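-- pv_equiv track=rewrite | github.com/johntango/Graphyt | Examples/lbmGrains.py | expandLabel
-- ===== SOURCE A (Python) =====
-- from itertools import product
--
-- def expandLabel(grainMap, label, L):
--     if(L[2] ==0): L[2] = 1
--
--     tmpLabels = [0] * (L[0] * L[1] * L[2])
--     for i in range(L[0] * L[1] * L[2]):
--         tmpLabels[i] = grainMap[i]
--
--     kMin = 0
--     kMax = L[2]
--     if L[2] < 2:
--         kMin = 0
--         kMax = 1
--
--     for k, j, i in product(range(kMin, kMax), range(0, L[1]), range(0, L[0])):
--         idx = i + (j + k * L[1]) * L[0]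
--         thisLabel = grainMap[idx]
--         if(thisLabel == label):
--             nkMin = k - 1
--             nkMax = k + 2
--             if L[2] < 2:
--                 nkMin = k
--                 nkMax = k + 1
--
--             for nk2, nj2, ni2 in product(range(nkMin, nkMax), range(j - 1, j + 2), range(i - 1, i + 2)):
--                 ni = ni2 % L[0]
--                 nj = nj2 % L[1]
--                 nk = nk2 % L[2]
--                 nidx = ni + (nj + nk * L[1]) * L[0]
--                 tmpLabels[nidx] = label
--     return tmpLabels
-- ===== SOURCE B (Python) =====
-- def expandLabel(grainMap, label, L):
--     # Gather formulation: instead of scattering the label from each seed into its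
--     # neighborhood, decide each output cell directly by testing whether any cell of
--     # its own wrapped neighborhood carries the label (the stencil is symmetric, so
--     # gather and scatter give the same dilation).  Does not mutate L (A sets L[2]=1
--     # in place when it is 0); the return value is identical.
--     L0, L1 = L[0], L[1]
--     L2 = 1 if L[2] == 0 else L[2]
--     n = L0 * L1 * L2
--     offsets = []
--     for dk in ((0,) if L2 < 2 else (-1, 0, 1)):
--         for dj in (-1, 0, 1):
--             for di in (-1, 0, 1):
--                 offsets.append((di, dj, dk))
--     out = []
--     for p in range(n):
--         i = p % L0
--         j = (p // L0) % L1
--         k = p // (L0 * L1)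
--         if any(grainMap[(i + di) % L0 + ((j + dj) % L1 + (k + dk) % L2 * L1) * L0] == label
--                for di, dj, dk in offsets):
--             out.append(label)
--         else:
--             out.append(grainMap[p])
--     return out
-- ===== Notes on version B (the rewrite author's own statement) =====
-- stated objective: alternative
-- what changed: A scatters: it scans all cells and, at each cell equal to label, writes label into the 27 (or 9) wrapped neighbor slots of a mutated copy; B gathers: it builds the output directly, deciding each cell by testing whether any cell of its own wrapped neighborhood in grainMap equals label (valid because the stencil is symmetric under negation); A also mutates L in place when L[2]==0, B does not — the return value is what is proved equal.
-- outside the precondition, e.g. on expandLabel([1, 2], 1, [-1, -2, 1]): A returns [1, 2], B returns [1, 1]; on expandLabel([1, 2], 9, [-1, 2, -1]): A returns [1, 2], B returns [1, 2]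
import Mathlib
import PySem

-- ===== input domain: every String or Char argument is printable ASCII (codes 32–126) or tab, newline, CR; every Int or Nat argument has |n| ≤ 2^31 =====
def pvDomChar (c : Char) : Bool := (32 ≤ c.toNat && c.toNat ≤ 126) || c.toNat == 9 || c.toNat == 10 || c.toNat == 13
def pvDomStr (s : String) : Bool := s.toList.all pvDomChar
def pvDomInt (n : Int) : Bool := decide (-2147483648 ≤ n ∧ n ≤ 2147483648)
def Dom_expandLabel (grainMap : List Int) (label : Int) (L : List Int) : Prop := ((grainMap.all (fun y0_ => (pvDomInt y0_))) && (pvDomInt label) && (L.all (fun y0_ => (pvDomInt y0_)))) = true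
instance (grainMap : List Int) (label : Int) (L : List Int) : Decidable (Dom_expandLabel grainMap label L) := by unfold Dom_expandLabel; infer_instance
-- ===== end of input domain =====

-- B replaces A's scatter (each seed stamps its wrapped neighborhood into a mutated copy) by a
-- gather (each output cell is decided by testing its own wrapped neighborhood; the symmetric
-- stencil makes the two dilations equal); A also mutates L[2] in place when it is 0, B does
-- not — the equivalence proved is about the return value.


-- ===== PORT A =====
-- inner dilation of A: the nested nk2/nj2/ni2 product with modulo wraparound
def pvA_stamp (label L0 L1 L2 k j i : Int) (t : List Int) : List Int :=
  let nkMin := if L2 < 2 then k else k - 1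
  let nkMax := if L2 < 2 then k + 1 else k + 2
  (PySem.List.pyRange nkMin nkMax 1).foldl (fun t nk2 =>
    (PySem.List.pyRange (j - 1) (j + 2) 1).foldl (fun t nj2 =>
      (PySem.List.pyRange (i - 1) (i + 2) 1).foldl (fun t ni2 =>
        let ni := PySem.Int.mod ni2 L0
        let nj := PySem.Int.mod nj2 L1
        let nk := PySem.Int.mod nk2 L2
        let nidx := ni + (nj + nk * L1) * L0
        PySem.List.pySetD t nidx label) t) t) t

-- body of A's main k/j/i loop
def pvA_cell (grainMap : List Int) (label L0 L1 L2 : Int) (t : List Int) (k j i : Int) : List Int :=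
  let idx := i + (j + k * L1) * L0
  let thisLabel := PySem.List.pyGetD grainMap idx 0
  if thisLabel = label then pvA_stamp label L0 L1 L2 k j i t else t

def expandLabel (grainMap : List Int) (label : Int) (L : List Int) : List Int :=
  -- if L[2] == 0: L[2] = 1  (models A's in-place write; L is read through L2 afterwards)
  let L2 := if PySem.List.pyGetD L 2 0 = 0 then 1 else PySem.List.pyGetD L 2 0
  let L0 := PySem.List.pyGetD L 0 0
  let L1 := PySem.List.pyGetD L 1 0
  let N := L0 * L1 * L2
  let tmp0 : List Int := PySem.List.pyRepeat [0] N
  let tmp1 := (PySem.List.pyRange 0 N 1).foldl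
    (fun t i => PySem.List.pySetD t i (PySem.List.pyGetD grainMap i 0)) tmp0
  let kMin := if L2 < 2 then 0 else 0
  let kMax := if L2 < 2 then 1 else L2
  (PySem.List.pyRange kMin kMax 1).foldl (fun t k =>
    (PySem.List.pyRange 0 L1 1).foldl (fun t j =>
      (PySem.List.pyRange 0 L0 1).foldl (fun t i =>
        pvA_cell grainMap label L0 L1 L2 t k j i) t) t) tmp1

-- ===== PORT B =====
-- B's offsets list: dk outer (only 0 when L2 < 2), then dj, then di, tuples (di, dj, dk)
def pvB_offs (L2 : Int) : List (Int × Int × Int) :=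
  (if L2 < 2 then ([0] : List Int) else [-1, 0, 1]).foldl (fun acc dk =>
    ([-1, 0, 1] : List Int).foldl (fun acc dj =>
      ([-1, 0, 1] : List Int).foldl (fun acc di => acc ++ [(di, dj, dk)]) acc) acc) []

-- the wrapped flat index of cell (i,j,k) shifted by offset d
def pvB_widx (L0 L1 L2 i j k : Int) (d : Int × Int × Int) : Int :=
  PySem.Int.mod (i + d.1) L0
    + (PySem.Int.mod (j + d.2.1) L1 + PySem.Int.mod (k + d.2.2) L2 * L1) * L0

-- B's per-cell gather: label iff some wrapped neighbor of p carries it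
def pvB_cell (g : List Int) (label L0 L1 L2 : Int) (offs : List (Int × Int × Int)) (p : Int) : Int :=
  let i := PySem.Int.mod p L0
  let j := PySem.Int.mod (PySem.Int.floordiv p L0) L1
  let k := PySem.Int.floordiv p (L0 * L1)
  if offs.any (fun d => PySem.List.pyGetD g (pvB_widx L0 L1 L2 i j k d) 0 == label)
  then label else PySem.List.pyGetD g p 0

def expandLabel_alt (grainMap : List Int) (label : Int) (L : List Int) : List Int :=
  let L0 := PySem.List.pyGetD L 0 0
  let L1 := PySem.List.pyGetD L 1 0
  let L2 := if PySem.List.pyGetD L 2 0 = 0 then 1 else PySem.List.pyGetD L 2 0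
  let n := L0 * L1 * L2
  let offs := pvB_offs L2
  (PySem.List.pyRange 0 n 1).map (pvB_cell grainMap label L0 L1 L2 offs)

-- ===== PRECONDITION & SPEC =====
-- Pre_ admits the natural domain (L has at least the 3 used entries, nonnegative
-- dimensions, grainMap covering the whole grid) plus the degenerate shapes on which A's
-- loops provably do nothing and B agrees.  Outside it A raises IndexError (grainMap or L
-- too short) or the dimensions mix negative sizes, which describe no grid: there A skips
-- empty loop ranges while B's gather may still wrap indices, and neither value is specified.
def Pre_expandLabel (grainMap : List Int) (label : Int) (L : List Int) : Prop :=
  3 ≤ L.length ∧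
    ((0 ≤ L.getD 0 0 ∧ 0 ≤ L.getD 1 0 ∧ 0 ≤ L.getD 2 0 ∧
        L.getD 0 0 * L.getD 1 0 * max 1 (L.getD 2 0) ≤ (grainMap.length : Int))
      ∨ (L.getD 0 0 < 0 ∧ 0 ≤ L.getD 1 0 ∧ 0 ≤ L.getD 2 0)
      ∨ (0 ≤ L.getD 0 0 ∧ L.getD 1 0 < 0 ∧ 0 ≤ L.getD 2 0)
      ∨ (L.getD 0 0 < 0 ∧ L.getD 1 0 < 0 ∧ L.getD 2 0 < 0)
      ∨ (0 ≤ L.getD 0 0 ∧ 0 ≤ L.getD 1 0 ∧ L.getD 2 0 < 0 ∧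
          L.getD 0 0 * L.getD 1 0 ≤ (grainMap.length : Int) ∧
          label ∉ grainMap.take (L.getD 0 0 * L.getD 1 0).toNat))
instance (grainMap : List Int) (label : Int) (L : List Int) : Decidable (Pre_expandLabel grainMap label L) := by unfold Pre_expandLabel; infer_instance

def pvWitness_expandLabel : List Int × Int × List Int :=
  ([1, 2, 2, 4, 5, 6, 7, 8], 2, [2, 2, 2])

def Spec_expandLabel (grainMap : List Int) (label : Int) (L : List Int) (out : List Int) : Prop := out = expandLabel_alt grainMap label L
instance (grainMap : List Int) (label : Int) (L : List Int) (out : List Int) : Decidable (Spec_expandLabel grainMap label L out) := by unfold Spec_expandLabel; infer_instance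

-- ===== CLAIM (what is proved, stated in full; the proofs are below) =====
def Claim_equal_expandLabel : Prop := ∀ (grainMap : List Int) (label : Int) (L : List Int), Dom_expandLabel grainMap label L → Pre_expandLabel grainMap label L → Spec_expandLabel grainMap label L (expandLabel grainMap label L)

-- ===== LEMMAS AND PROOFS =====

-- range (a-1)..(a+2) is the three offsets -1,0,1 shifted by a
lemma pv_range3 (a : Int) :
    PySem.List.pyRange (a - 1) (a + 2) 1 = ([-1, 0, 1] : List Int).map (fun d => a + d) := by
  rw [PySem.List.pyRange_one_cons (by omega), PySem.List.pyRange_one_cons (by omega),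
    PySem.List.pyRange_one_cons (by omega), PySem.List.pyRange_one_eq_nil (by omega)]
  simp
  omega

-- range a..(a+1) is the single offset 0 shifted by a
lemma pv_range1 (a : Int) :
    PySem.List.pyRange a (a + 1) 1 = ([0] : List Int).map (fun d => a + d) := by
  rw [PySem.List.pyRange_one_singleton]
  simp

-- the two literal values of B's offsets list
lemma pv_offs_small (L2 : Int) (h : L2 < 2) :
    pvB_offs L2 = [(-1,-1,0),(0,-1,0),(1,-1,0),(-1,0,0),(0,0,0),(1,0,0),(-1,1,0),(0,1,0),(1,1,0)] := by
  unfold pvB_offs; rw [if_pos h]; rfl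

lemma pv_offs_big (L2 : Int) (h : ¬ L2 < 2) :
    pvB_offs L2 =
      [(-1,-1,-1),(0,-1,-1),(1,-1,-1),(-1,0,-1),(0,0,-1),(1,0,-1),(-1,1,-1),(0,1,-1),(1,1,-1),
       (-1,-1,0),(0,-1,0),(1,-1,0),(-1,0,0),(0,0,0),(1,0,0),(-1,1,0),(0,1,0),(1,1,0),
       (-1,-1,1),(0,-1,1),(1,-1,1),(-1,0,1),(0,0,1),(1,0,1),(-1,1,1),(0,1,1),(1,1,1)] := by
  unfold pvB_offs; rw [if_neg h]; rfl

-- B's offsets are closed under negation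
lemma pv_offs_neg (L2 : Int) (d : Int × Int × Int) (hd : d ∈ pvB_offs L2) :
    (-d.1, -d.2.1, -d.2.2) ∈ pvB_offs L2 := by
  by_cases h : L2 < 2
  · rw [pv_offs_small L2 h] at *
    fin_cases hd <;> decide
  · rw [pv_offs_big L2 h] at *
    fin_cases hd <;> decide

-- A's stamp at cell (i,j,k) is a plain fold of writes over B's offsets list
lemma pv_stamp_writes (label L0 L1 L2 i j k : Int) (t : List Int) :
    pvA_stamp label L0 L1 L2 k j i t
      = ((pvB_offs L2).map (pvB_widx L0 L1 L2 i j k)).foldl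
          (fun t q => PySem.List.pySetD t q label) t := by
  unfold pvA_stamp
  by_cases h2 : L2 < 2
  · simp only [if_pos h2, pv_offs_small L2 h2]
    rw [pv_range1, pv_range3, pv_range3]
    simp only [List.map_cons, List.map_nil, List.foldl_cons, List.foldl_nil,
      pvB_widx]
  · simp only [if_neg h2, pv_offs_big L2 h2]
    rw [pv_range3 k, pv_range3, pv_range3]
    simp only [List.map_cons, List.map_nil, List.foldl_cons, List.foldl_nil,
      pvB_widx]

-- the element-copy loop writes g's first n values over init
lemma pv_copy_fold (g : List Int) :
    ∀ (n : Nat) (init : List Int), n ≤ g.length → n ≤ init.length →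
      (List.range n).foldl (fun t k => t.set k (g.getD k 0)) init = g.take n ++ init.drop n := by
  intro n
  induction n with
  | zero => intro init _ _; simp
  | succ m ih =>
    intro init hg hi
    rw [List.range_succ, List.foldl_append]
    rw [ih init (by omega) (by omega)]
    simp only [List.foldl_cons, List.foldl_nil]
    rw [List.set_append]
    have hlt : m < g.length := by omega
    have htk : (List.take m g).length = m := by simp; omega
    rw [htk]
    obtain ⟨c, rest, hdrop⟩ : ∃ c rest, init.drop m = c :: rest := by
      cases h : init.drop m with
      | nil => exfalso; have := List.length_drop (l := init) (i := m); rw [h] at this; simp at this; omega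
      | cons c rest => exact ⟨c, rest, rfl⟩
    have hdrop1 : init.drop (m + 1) = rest := by
      rw [← List.drop_drop, hdrop]; rfl
    have hg1 : g.take (m + 1) = g.take m ++ [g[m]] := by
      rw [List.take_add_one]; simp [List.getElem?_eq_getElem hlt]
    rw [hdrop, hdrop1]
    simp [List.getD, List.getElem?_eq_getElem hlt]
    rw [hg1, List.append_assoc, List.singleton_append]

-- A's copy loop builds grainMap's first N entries
lemma pv_copy (g : List Int) (N : Int) (h0 : 0 ≤ N) (h : N ≤ (g.length : Int)) :
    (PySem.List.pyRange 0 N 1).foldl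
      (fun t i => PySem.List.pySetD t i (PySem.List.pyGetD g i 0))
      (PySem.List.pyRepeat [0] N) = g.take N.toNat := by
  rw [PySem.List.pyRange_one, PySem.List.pyRepeat_singleton, List.foldl_map]
  simp only [sub_zero, zero_add, PySem.List.pySetD_natCast, PySem.List.pyGetD_natCast]
  rw [pv_copy_fold g N.toNat (List.replicate N.toNat 0) (by omega) (by simp)]
  simp

-- a j/i double loop is the flat loop over I*J with p = i + j*I decoded by div/mod
lemma pv_nested2 {α : Type} (I : Int) (hI : 0 < I) (f : α → Int → Int → α) :
    ∀ (n : Nat) (a : α),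
      (PySem.List.pyRange 0 (n : Int) 1).foldl
        (fun t j => (PySem.List.pyRange 0 I 1).foldl (fun t i => f t j i) t) a
      = (PySem.List.pyRange 0 (I * (n : Int)) 1).foldl
          (fun t p => f t (PySem.Int.floordiv p I) (PySem.Int.mod p I)) a := by
  intro n
  induction n with
  | zero => intro a; simp [PySem.List.pyRange_one_eq_nil]
  | succ m ih =>
    intro a
    have hcast : ((m + 1 : Nat) : Int) = (m : Int) + 1 := by push_cast; ring
    rw [hcast, PySem.List.pyRange_one_succ_right (by positivity),
      List.foldl_append]
    rw [ih a]
    have hsplit : PySem.List.pyRange 0 (I * ((m : Int) + 1)) 1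
        = PySem.List.pyRange 0 (I * (m : Int)) 1
          ++ PySem.List.pyRange (I * (m : Int)) (I * (m : Int) + I) 1 := by
      rw [show I * ((m : Int) + 1) = I * (m : Int) + I by ring]
      exact PySem.List.pyRange_one_append 0 (I * (m : Int)) (I * (m : Int) + I)
        (by positivity) (by omega)
    rw [hsplit, List.foldl_append]
    simp only [List.foldl_cons, List.foldl_nil]
    rw [PySem.List.pyRange_one (I * (m : Int)) (I * (m : Int) + I),
      PySem.List.pyRange_one 0 I, List.foldl_map, List.foldl_map]
    rw [show I * (m : Int) + I - I * (m : Int) = I by ring, sub_zero]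
    apply PySem.List.foldl_congr_mem
    intro acc k hk
    have hkI : (k : Int) < I := by
      have := List.mem_range.mp hk; omega
    have hdiv : PySem.Int.floordiv (I * (m : Int) + (k : Int)) I = (m : Int) := by
      rw [PySem.Int.floordiv_eq_ediv_of_pos hI,
        show I * (m : Int) + (k : Int) = (k : Int) + (m : Int) * I by ring,
        Int.add_mul_ediv_right _ _ (by omega : I ≠ 0),
        Int.ediv_eq_zero_of_lt (by positivity) hkI]
      ring
    have hmod : PySem.Int.mod (I * (m : Int) + (k : Int)) I = (k : Int) := by
      rw [PySem.Int.mod_eq_emod_of_pos hI,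
        show I * (m : Int) + (k : Int) = (k : Int) + (m : Int) * I by ring,
        Int.add_mul_emod_self_right]
      exact Int.emod_eq_of_lt (by positivity) hkI
    rw [hdiv, hmod]
    simp

-- a k/j/i triple loop is the flat loop over I*J*K with p decoded by div/mod
lemma pv_nested3 {α : Type} (I J : Int) (hI : 0 < I) (hJ : 0 < J)
    (f : α → Int → Int → Int → α) :
    ∀ (n : Nat) (a : α),
      (PySem.List.pyRange 0 (n : Int) 1).foldl
        (fun t k => (PySem.List.pyRange 0 J 1).foldl
          (fun t j => (PySem.List.pyRange 0 I 1).foldl (fun t i => f t k j i) t) t) a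
      = (PySem.List.pyRange 0 (I * J * (n : Int)) 1).foldl
          (fun t p => f t (PySem.Int.floordiv p (I * J))
            (PySem.Int.mod (PySem.Int.floordiv p I) J) (PySem.Int.mod p I)) a := by
  intro n
  induction n with
  | zero => intro a; simp [PySem.List.pyRange_one_eq_nil]
  | succ m ih =>
    intro a
    have hIJ : 0 < I * J := by positivity
    have hcast : ((m + 1 : Nat) : Int) = (m : Int) + 1 := by push_cast; ring
    rw [hcast, PySem.List.pyRange_one_succ_right (by positivity), List.foldl_append]
    rw [ih a]
    have hsplit : PySem.List.pyRange 0 (I * J * ((m : Int) + 1)) 1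
        = PySem.List.pyRange 0 (I * J * (m : Int)) 1
          ++ PySem.List.pyRange (I * J * (m : Int)) (I * J * (m : Int) + I * J) 1 := by
      rw [show I * J * ((m : Int) + 1) = I * J * (m : Int) + I * J by ring]
      exact PySem.List.pyRange_one_append _ _ _ (by positivity) (by omega)
    rw [hsplit, List.foldl_append]
    simp only [List.foldl_cons, List.foldl_nil]
    obtain ⟨nJ, hnJ⟩ : ∃ nJ : Nat, J = (nJ : Int) := ⟨J.toNat, by omega⟩
    rw [hnJ, pv_nested2 I hI (fun t j i => f t (m : Int) j i) nJ, ← hnJ]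
    rw [PySem.List.pyRange_one (I * J * (m : Int)) (I * J * (m : Int) + I * J),
      PySem.List.pyRange_one 0 (I * J), List.foldl_map, List.foldl_map]
    rw [show I * J * (m : Int) + I * J - I * J * (m : Int) = I * J by ring, sub_zero]
    apply PySem.List.foldl_congr_mem
    intro acc q hq
    have hqIJ : (q : Int) < I * J := by
      have := List.mem_range.mp hq; omega
    have hq0 : (0 : Int) ≤ (q : Int) := by positivity
    have hdiv3 : PySem.Int.floordiv (I * J * (m : Int) + (q : Int)) (I * J) = (m : Int) := by
      rw [PySem.Int.floordiv_eq_ediv_of_pos hIJ,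
        show I * J * (m : Int) + (q : Int) = (q : Int) + (m : Int) * (I * J) by ring,
        Int.add_mul_ediv_right _ _ (by omega : I * J ≠ 0),
        Int.ediv_eq_zero_of_lt hq0 hqIJ]
      ring
    have hdivI : PySem.Int.floordiv (I * J * (m : Int) + (q : Int)) I
        = PySem.Int.floordiv (q : Int) I + J * (m : Int) := by
      rw [PySem.Int.floordiv_eq_ediv_of_pos hI, PySem.Int.floordiv_eq_ediv_of_pos hI,
        show I * J * (m : Int) + (q : Int) = (q : Int) + (J * (m : Int)) * I by ring,
        Int.add_mul_ediv_right _ _ (by omega : I ≠ 0)]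
    have hmodJ : PySem.Int.mod (PySem.Int.floordiv (q : Int) I + J * (m : Int)) J
        = PySem.Int.floordiv (q : Int) I := by
      rw [PySem.Int.mod_eq_emod_of_pos hJ,
        show PySem.Int.floordiv (q : Int) I + J * (m : Int)
          = PySem.Int.floordiv (q : Int) I + (m : Int) * J by ring,
        Int.add_mul_emod_self_right]
      rw [PySem.Int.floordiv_eq_ediv_of_pos hI]
      exact Int.emod_eq_of_lt (Int.ediv_nonneg hq0 (by omega))
        (Int.ediv_lt_of_lt_mul hI (by linarith [mul_comm I J]))
    have hmodI : PySem.Int.mod (I * J * (m : Int) + (q : Int)) I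
        = PySem.Int.mod (q : Int) I := by
      rw [PySem.Int.mod_eq_emod_of_pos hI, PySem.Int.mod_eq_emod_of_pos hI,
        show I * J * (m : Int) + (q : Int) = (q : Int) + (J * (m : Int)) * I by ring,
        Int.add_mul_emod_self_right]
    rw [hdiv3, hdivI, hmodJ, hmodI]
    simp

-- re-encoding the decoded coordinates of p gives back p
lemma pv_encdec (I J p : Int) (hI : 0 < I) (hJ : 0 < J) :
    PySem.Int.mod p I
      + (PySem.Int.mod (PySem.Int.floordiv p I) J
          + PySem.Int.floordiv p (I * J) * J) * I = p := by
  rw [PySem.Int.mod_eq_emod_of_pos hI, PySem.Int.mod_eq_emod_of_pos hJ,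
    PySem.Int.floordiv_eq_ediv_of_pos hI, PySem.Int.floordiv_eq_ediv_of_pos (by positivity),
    ← Int.ediv_ediv_of_nonneg (by omega : (0:Int) ≤ I)]
  have h1 : p / I % J + p / I / J * J = p / I := Int.emod_add_ediv_mul _ _
  have h2 : p % I + p / I * I = p := Int.emod_add_ediv_mul _ _
  nlinarith [h1, h2]

-- the wrapped index always lies inside the grid
lemma pv_widx_range (L0 L1 L2 i j k : Int) (d : Int × Int × Int)
    (h0 : 0 < L0) (h1 : 0 < L1) (h2 : 0 < L2) :
    0 ≤ pvB_widx L0 L1 L2 i j k d ∧ pvB_widx L0 L1 L2 i j k d < L0 * L1 * L2 := by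
  unfold pvB_widx
  have a0 := PySem.Int.mod_nonneg (i + d.1) h0
  have a1 := PySem.Int.mod_lt (i + d.1) h0
  have b0 := PySem.Int.mod_nonneg (j + d.2.1) h1
  have b1 := PySem.Int.mod_lt (j + d.2.1) h1
  have c0 := PySem.Int.mod_nonneg (k + d.2.2) h2
  have c1 := PySem.Int.mod_lt (k + d.2.2) h2
  constructor
  · positivity
  · have hbc : PySem.Int.mod (j + d.2.1) L1 + PySem.Int.mod (k + d.2.2) L2 * L1 ≤ L1 * L2 - 1 := by
      nlinarith [mul_le_mul_of_nonneg_right (show PySem.Int.mod (k + d.2.2) L2 + 1 ≤ L2 from c1) (le_of_lt h1)]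
    nlinarith [mul_le_mul_of_nonneg_right hbc (le_of_lt h0)]

-- decoding an encoded in-range triple gives the components back
lemma pv_dec_enc (L0 L1 L2 a b c : Int) (h0 : 0 < L0) (h1 : 0 < L1) (_h2 : 0 < L2)
    (ha : 0 ≤ a) (ha' : a < L0) (hb : 0 ≤ b) (hb' : b < L1) :
    PySem.Int.mod (a + (b + c * L1) * L0) L0 = a
    ∧ PySem.Int.mod (PySem.Int.floordiv (a + (b + c * L1) * L0) L0) L1 = b
    ∧ PySem.Int.floordiv (a + (b + c * L1) * L0) (L0 * L1) = c := by
  have hfd : PySem.Int.floordiv (a + (b + c * L1) * L0) L0 = b + c * L1 := by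
    rw [PySem.Int.floordiv_eq_ediv_of_pos h0, Int.add_mul_ediv_right _ _ (by omega : L0 ≠ 0),
      Int.ediv_eq_zero_of_lt ha ha', zero_add]
  refine ⟨?_, ?_, ?_⟩
  · rw [PySem.Int.mod_eq_emod_of_pos h0, Int.add_mul_emod_self_right]
    exact Int.emod_eq_of_lt ha ha'
  · rw [hfd, PySem.Int.mod_eq_emod_of_pos h1, Int.add_mul_emod_self_right]
    exact Int.emod_eq_of_lt hb hb'
  · rw [PySem.Int.floordiv_eq_ediv_of_pos (by positivity),
      show a + (b + c * L1) * L0 = (a + b * L0) + c * (L0 * L1) by ring,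
      Int.add_mul_ediv_right _ _ (by positivity : (0:Int) < L0 * L1).ne',
      Int.ediv_eq_zero_of_lt (by positivity) (by nlinarith), zero_add]

-- wrapping by +dx then by -dx is the identity on an in-range coordinate
lemma pv_mod_shift_back (M x dx : Int) (hM : 0 < M) (hx : 0 ≤ x) (hx' : x < M) :
    PySem.Int.mod (PySem.Int.mod (x + dx) M + -dx) M = x := by
  rw [PySem.Int.mod_eq_emod_of_pos hM, PySem.Int.mod_eq_emod_of_pos hM]
  conv_lhs => rw [show (x + dx) % M + -dx = (x + dx) % M - dx by ring]
  rw [Int.sub_emod, Int.emod_emod_of_dvd _ (dvd_refl M), ← Int.sub_emod,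
    show x + dx - dx = x by ring]
  exact Int.emod_eq_of_lt hx hx'

-- shifting by d and back by -d returns to the same flat cell
lemma pv_roundtrip (L0 L1 L2 p : Int) (d : Int × Int × Int)
    (h0 : 0 < L0) (h1 : 0 < L1) (h2 : 0 < L2) (hp0 : 0 ≤ p) (hpN : p < L0 * L1 * L2) :
    pvB_widx L0 L1 L2
      (PySem.Int.mod (pvB_widx L0 L1 L2 (PySem.Int.mod p L0)
        (PySem.Int.mod (PySem.Int.floordiv p L0) L1) (PySem.Int.floordiv p (L0 * L1)) d) L0)
      (PySem.Int.mod (PySem.Int.floordiv (pvB_widx L0 L1 L2 (PySem.Int.mod p L0)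
        (PySem.Int.mod (PySem.Int.floordiv p L0) L1) (PySem.Int.floordiv p (L0 * L1)) d) L0) L1)
      (PySem.Int.floordiv (pvB_widx L0 L1 L2 (PySem.Int.mod p L0)
        (PySem.Int.mod (PySem.Int.floordiv p L0) L1) (PySem.Int.floordiv p (L0 * L1)) d) (L0 * L1))
      (-d.1, -d.2.1, -d.2.2) = p := by
  set i := PySem.Int.mod p L0 with hi
  set j := PySem.Int.mod (PySem.Int.floordiv p L0) L1 with hj
  set k := PySem.Int.floordiv p (L0 * L1) with hk
  have hi0 : 0 ≤ i := PySem.Int.mod_nonneg p h0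
  have hi1 : i < L0 := PySem.Int.mod_lt p h0
  have hj0 : 0 ≤ j := PySem.Int.mod_nonneg _ h1
  have hj1 : j < L1 := PySem.Int.mod_lt _ h1
  have hk0 : 0 ≤ k := by
    rw [hk, PySem.Int.floordiv_eq_ediv_of_pos (by positivity)]
    exact Int.ediv_nonneg hp0 (by positivity)
  have hk1 : k < L2 := by
    rw [hk, PySem.Int.floordiv_eq_ediv_of_pos (by positivity)]
    exact Int.ediv_lt_of_lt_mul (by positivity) (by nlinarith)
  set a := PySem.Int.mod (i + d.1) L0 with hadef
  set b := PySem.Int.mod (j + d.2.1) L1 with hbdef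
  set c := PySem.Int.mod (k + d.2.2) L2 with hcdef
  have hweq : pvB_widx L0 L1 L2 i j k d = a + (b + c * L1) * L0 := rfl
  have ha0 : 0 ≤ a := PySem.Int.mod_nonneg _ h0
  have ha1 : a < L0 := PySem.Int.mod_lt _ h0
  have hb0 : 0 ≤ b := PySem.Int.mod_nonneg _ h1
  have hb1 : b < L1 := PySem.Int.mod_lt _ h1
  obtain ⟨e1, e2, e3⟩ := pv_dec_enc L0 L1 L2 a b c h0 h1 h2 ha0 ha1 hb0 hb1
  rw [hweq, e1, e2, e3]
  show PySem.Int.mod (a + -d.1) L0 + (PySem.Int.mod (b + -d.2.1) L1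
    + PySem.Int.mod (c + -d.2.2) L2 * L1) * L0 = p
  rw [hadef, hbdef, hcdef,
    pv_mod_shift_back L0 i d.1 h0 hi0 hi1,
    pv_mod_shift_back L1 j d.2.1 h1 hj0 hj1,
    pv_mod_shift_back L2 k d.2.2 h2 hk0 hk1]
  rw [hi, hj, hk]
  rw [PySem.Int.mod_eq_emod_of_pos h0, PySem.Int.mod_eq_emod_of_pos h1,
    PySem.Int.floordiv_eq_ediv_of_pos h0, PySem.Int.floordiv_eq_ediv_of_pos (by positivity),
    ← Int.ediv_ediv_of_nonneg (by omega : (0:Int) ≤ L0)]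
  have q1 : p / L0 % L1 + p / L0 / L1 * L1 = p / L0 := Int.emod_add_ediv_mul _ _
  have q2 : p % L0 + p / L0 * L0 = p := Int.emod_add_ediv_mul _ _
  nlinarith [q1, q2]

-- a fold of writes of one value preserves the length
lemma pv_setfold_length (label : Int) (ws : List Int) :
    ∀ (t : List Int), (ws.foldl (fun t q => PySem.List.pySetD t q label) t).length = t.length := by
  induction ws with
  | nil => intro t; rfl
  | cons w ws ih =>
    intro t
    simp only [List.foldl_cons]
    rw [ih, PySem.List.length_pySetD]

-- a fold of nonnegative-index writes of one value, read back pointwise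
lemma pv_setfold_getElem (label : Int) (ws : List Int) :
    ∀ (t : List Int) (qn : Nat) (hq : qn < t.length), (∀ w ∈ ws, 0 ≤ w) →
      (ws.foldl (fun t q => PySem.List.pySetD t q label) t)[qn]'(by rw [pv_setfold_length]; exact hq)
        = if (qn : Int) ∈ ws then label else t[qn] := by
  induction ws with
  | nil => intro t qn hq _; simp
  | cons w ws ih =>
    intro t qn hq hw
    simp only [List.foldl_cons]
    have hw0 : 0 ≤ w := hw w (List.mem_cons_self ..)
    have hq' : qn < (PySem.List.pySetD t w label).length := by
      rw [PySem.List.length_pySetD]; exact hq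
    rw [ih (PySem.List.pySetD t w label) qn hq' (fun x hx => hw x (List.mem_cons_of_mem _ hx))]
    by_cases hmem : (qn : Int) ∈ ws
    · simp [hmem]
    · simp only [hmem, if_false, List.mem_cons, or_false]
      by_cases he : (qn : Int) = w
      · have hnat : w.toNat = qn := by omega
        simp [he, PySem.List.pySetD_of_nonneg t label hw0, hnat]
      · have hnat : ¬ w.toNat = qn := by omega
        simp [he, PySem.List.pySetD_of_nonneg t label hw0, hnat]

-- A's whole scan, read back pointwise: a cell holds label iff some seed's write list hits it
lemma pv_cellfold_length (label : Int) (C : Int → Prop) [DecidablePred C] (W : Int → List Int)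
    (ps : List Int) :
    ∀ (t : List Int),
      (ps.foldl (fun t p =>
        if C p then (W p).foldl (fun t q => PySem.List.pySetD t q label) t else t) t).length
      = t.length := by
  induction ps with
  | nil => intro t; rfl
  | cons p ps ih =>
    intro t
    simp only [List.foldl_cons]
    rw [ih]
    split
    · exact pv_setfold_length label (W p) t
    · rfl

lemma pv_cellfold_getElem (label : Int) (C : Int → Prop) [DecidablePred C] (W : Int → List Int)
    (hW : ∀ p w, w ∈ W p → 0 ≤ w) (ps : List Int) :
    ∀ (t : List Int) (qn : Nat) (hq : qn < t.length),
      (ps.foldl (fun t p =>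
        if C p then (W p).foldl (fun t q => PySem.List.pySetD t q label) t else t)
        t)[qn]'(by rw [pv_cellfold_length]; exact hq)
      = if ∃ p ∈ ps, C p ∧ (qn : Int) ∈ W p then label else t[qn] := by
  induction ps with
  | nil => intro t qn hq; simp
  | cons p ps ih =>
    intro t qn hq
    simp only [List.foldl_cons]
    by_cases hC : C p
    · simp only [if_pos hC]
      rw [ih ((W p).foldl (fun t q => PySem.List.pySetD t q label) t) qn
        (by rw [pv_setfold_length]; exact hq)]
      rw [pv_setfold_getElem label (W p) t qn hq (hW p)]
      by_cases hex : ∃ p' ∈ ps, C p' ∧ (qn : Int) ∈ W p'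
      · rw [if_pos hex, if_pos (by
          obtain ⟨p', hp', h⟩ := hex
          exact ⟨p', List.mem_cons_of_mem _ hp', h⟩)]
      · rw [if_neg hex]
        by_cases hmem : (qn : Int) ∈ W p
        · rw [if_pos hmem, if_pos ⟨p, List.mem_cons_self .., hC, hmem⟩]
        · rw [if_neg hmem, if_neg (by
            rintro ⟨p', hp', hC', hm'⟩
            rcases List.mem_cons.mp hp' with rfl | hp'
            · exact hmem hm'
            · exact hex ⟨p', hp', hC', hm'⟩)]
    · simp only [if_neg hC]
      rw [ih t qn hq]
      by_cases hex : ∃ p' ∈ ps, C p' ∧ (qn : Int) ∈ W p'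
      · rw [if_pos hex, if_pos (by
          obtain ⟨p', hp', h⟩ := hex
          exact ⟨p', List.mem_cons_of_mem _ hp', h⟩)]
      · rw [if_neg hex, if_neg (by
          rintro ⟨p', hp', hC', hm'⟩
          rcases List.mem_cons.mp hp' with rfl | hp'
          · exact hC hC'
          · exact hex ⟨p', hp', hC', hm'⟩)]

-- the scatter condition at q is the gather condition at q
lemma pv_hit_iff (g : List Int) (label L0 L1 L2 : Int)
    (h0 : 0 < L0) (h1 : 0 < L1) (h2 : 0 < L2) (q : Int)
    (hq0 : 0 ≤ q) (hqN : q < L0 * L1 * L2) :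
    (∃ p ∈ PySem.List.pyRange 0 (L0 * L1 * L2) 1, PySem.List.pyGetD g p 0 = label ∧
        q ∈ (pvB_offs L2).map (pvB_widx L0 L1 L2 (PySem.Int.mod p L0)
          (PySem.Int.mod (PySem.Int.floordiv p L0) L1) (PySem.Int.floordiv p (L0 * L1))))
    ↔ ∃ d ∈ pvB_offs L2, PySem.List.pyGetD g (pvB_widx L0 L1 L2 (PySem.Int.mod q L0)
        (PySem.Int.mod (PySem.Int.floordiv q L0) L1) (PySem.Int.floordiv q (L0 * L1)) d) 0 = label := by
  constructor
  · rintro ⟨p, hp, hseed, hqW⟩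
    obtain ⟨hp0, hpN⟩ := PySem.List.mem_pyRange_one.mp hp
    obtain ⟨d, hd, hdq⟩ := List.mem_map.mp hqW
    refine ⟨(-d.1, -d.2.1, -d.2.2), pv_offs_neg L2 d hd, ?_⟩
    rw [← hdq]
    rw [pv_roundtrip L0 L1 L2 p d h0 h1 h2 hp0 hpN]
    exact hseed
  · rintro ⟨d, hd, hlab⟩
    refine ⟨pvB_widx L0 L1 L2 (PySem.Int.mod q L0)
        (PySem.Int.mod (PySem.Int.floordiv q L0) L1) (PySem.Int.floordiv q (L0 * L1)) d,
      PySem.List.mem_pyRange_one.mpr (pv_widx_range L0 L1 L2 _ _ _ d h0 h1 h2), hlab, ?_⟩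
    exact List.mem_map.mpr ⟨(-d.1, -d.2.1, -d.2.2), pv_offs_neg L2 d hd,
      pv_roundtrip L0 L1 L2 q d h0 h1 h2 hq0 hqN⟩

-- the main positive-grid case: A's flattened scatter equals B's gather map
lemma pv_main_pos (g : List Int) (label L0 L1 L2 : Int)
    (h0 : 0 < L0) (h1 : 0 < L1) (h2 : 0 < L2) (hlen : L0 * L1 * L2 ≤ (g.length : Int)) :
    (PySem.List.pyRange 0 (L0 * L1 * L2) 1).foldl (fun t p =>
        pvA_cell g label L0 L1 L2 t (PySem.Int.floordiv p (L0 * L1))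
          (PySem.Int.mod (PySem.Int.floordiv p L0) L1) (PySem.Int.mod p L0))
      (g.take (L0 * L1 * L2).toNat)
    = (PySem.List.pyRange 0 (L0 * L1 * L2) 1).map (pvB_cell g label L0 L1 L2 (pvB_offs L2)) := by
  have hcell : ∀ (t : List Int) (p : Int),
      pvA_cell g label L0 L1 L2 t (PySem.Int.floordiv p (L0 * L1))
        (PySem.Int.mod (PySem.Int.floordiv p L0) L1) (PySem.Int.mod p L0)
      = if PySem.List.pyGetD g p 0 = label
        then ((pvB_offs L2).map (pvB_widx L0 L1 L2 (PySem.Int.mod p L0)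
            (PySem.Int.mod (PySem.Int.floordiv p L0) L1)
            (PySem.Int.floordiv p (L0 * L1)))).foldl
          (fun t q => PySem.List.pySetD t q label) t
        else t := by
    intro t p
    unfold pvA_cell
    rw [pv_encdec L0 L1 p h0 h1, pv_stamp_writes]
  have hbody : (PySem.List.pyRange 0 (L0 * L1 * L2) 1).foldl (fun t p =>
        pvA_cell g label L0 L1 L2 t (PySem.Int.floordiv p (L0 * L1))
          (PySem.Int.mod (PySem.Int.floordiv p L0) L1) (PySem.Int.mod p L0))
      (g.take (L0 * L1 * L2).toNat)
      = (PySem.List.pyRange 0 (L0 * L1 * L2) 1).foldl (fun t p =>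
          if PySem.List.pyGetD g p 0 = label
          then ((pvB_offs L2).map (pvB_widx L0 L1 L2 (PySem.Int.mod p L0)
              (PySem.Int.mod (PySem.Int.floordiv p L0) L1)
              (PySem.Int.floordiv p (L0 * L1)))).foldl
            (fun t q => PySem.List.pySetD t q label) t
          else t)
        (g.take (L0 * L1 * L2).toNat) := by
    apply PySem.List.foldl_congr_mem
    intro acc p _
    exact hcell acc p
  rw [hbody]
  have hN0 : (0 : Int) ≤ L0 * L1 * L2 := by positivity
  have htlen : (g.take (L0 * L1 * L2).toNat).length = (L0 * L1 * L2).toNat := by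
    simp [List.length_take]; omega
  have hrlen : (PySem.List.pyRange 0 (L0 * L1 * L2) 1).length = (L0 * L1 * L2).toNat := by
    rw [PySem.List.pyRange_one]; simp
  apply List.ext_getElem
  · rw [pv_cellfold_length, List.length_map, htlen, hrlen]
  · intro qn hq1 hq2
    have hqn : qn < (L0 * L1 * L2).toNat := by
      rw [pv_cellfold_length, htlen] at hq1; exact hq1
    have hq0 : (0 : Int) ≤ (qn : Int) := by positivity
    have hqNi : (qn : Int) < L0 * L1 * L2 := by omega
    have hqt : qn < (g.take (L0 * L1 * L2).toNat).length := by rw [htlen]; exact hqn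
    rw [pv_cellfold_getElem label (fun p => PySem.List.pyGetD g p 0 = label)
      (fun p => (pvB_offs L2).map (pvB_widx L0 L1 L2 (PySem.Int.mod p L0)
        (PySem.Int.mod (PySem.Int.floordiv p L0) L1) (PySem.Int.floordiv p (L0 * L1))))
      (by
        intro p w hw
        obtain ⟨d, _, hdw⟩ := List.mem_map.mp hw
        rw [← hdw]
        exact (pv_widx_range L0 L1 L2 _ _ _ d h0 h1 h2).1)
      (PySem.List.pyRange 0 (L0 * L1 * L2) 1) (g.take (L0 * L1 * L2).toNat) qn hqt]
    -- right-hand side: the gather cell at qn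
    have hidx : (PySem.List.pyRange 0 (L0 * L1 * L2) 1)[qn]'(by rw [hrlen]; exact hqn)
        = (qn : Int) := by
      simp [PySem.List.pyRange_one]
    rw [List.getElem_map, hidx]
    unfold pvB_cell
    simp only
    have hany : ((pvB_offs L2).any (fun d =>
        PySem.List.pyGetD g (pvB_widx L0 L1 L2 (PySem.Int.mod (qn : Int) L0)
          (PySem.Int.mod (PySem.Int.floordiv (qn : Int) L0) L1)
          (PySem.Int.floordiv (qn : Int) (L0 * L1)) d) 0 == label) = true)
        ↔ ∃ d ∈ pvB_offs L2, PySem.List.pyGetD g (pvB_widx L0 L1 L2 (PySem.Int.mod (qn : Int) L0)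
          (PySem.Int.mod (PySem.Int.floordiv (qn : Int) L0) L1)
          (PySem.Int.floordiv (qn : Int) (L0 * L1)) d) 0 = label := by
      rw [List.any_eq_true]
      constructor
      · rintro ⟨d, hd, hbeq⟩; exact ⟨d, hd, beq_iff_eq.mp hbeq⟩
      · rintro ⟨d, hd, heq⟩; exact ⟨d, hd, beq_iff_eq.mpr heq⟩
    have hcond := pv_hit_iff g label L0 L1 L2 h0 h1 h2 (qn : Int) hq0 hqNi
    have htake : (g.take (L0 * L1 * L2).toNat)[qn]'hqt = g[qn]'(by omega) := by
      rw [List.getElem_take]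
    have hgq : PySem.List.pyGetD g (qn : Int) 0 = g[qn]'(by omega) := by
      rw [PySem.List.pyGetD_eq_getElem g 0 hq0 (by omega)]
      simp
    by_cases hx : ∃ d ∈ pvB_offs L2, PySem.List.pyGetD g (pvB_widx L0 L1 L2
        (PySem.Int.mod (qn : Int) L0) (PySem.Int.mod (PySem.Int.floordiv (qn : Int) L0) L1)
        (PySem.Int.floordiv (qn : Int) (L0 * L1)) d) 0 = label
    · rw [if_pos (hcond.mpr hx), if_pos (hany.mpr hx)]
    · rw [if_neg (fun h => hx (hcond.mp h)), if_neg (fun h => hx (hany.mp h)), htake, hgq]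

theorem pv_main (g : List Int) (label : Int) (l0 l1 l2 : Int) (rest : List Int)
    (hdisj :
      (0 ≤ l0 ∧ 0 ≤ l1 ∧ 0 ≤ l2 ∧ l0 * l1 * max 1 l2 ≤ (g.length : Int))
      ∨ (l0 < 0 ∧ 0 ≤ l1 ∧ 0 ≤ l2)
      ∨ (0 ≤ l0 ∧ l1 < 0 ∧ 0 ≤ l2)
      ∨ (l0 < 0 ∧ l1 < 0 ∧ l2 < 0)
      ∨ (0 ≤ l0 ∧ 0 ≤ l1 ∧ l2 < 0 ∧ l0 * l1 ≤ (g.length : Int)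
          ∧ label ∉ g.take (l0 * l1).toNat)) :
    expandLabel g label (l0 :: l1 :: l2 :: rest)
      = expandLabel_alt g label (l0 :: l1 :: l2 :: rest) := by
  unfold expandLabel expandLabel_alt
  have e0 : PySem.List.pyGetD (l0 :: l1 :: l2 :: rest) 0 0 = l0 := by
    simp [PySem.List.pyGetD_zero_cons]
  have e1 : PySem.List.pyGetD (l0 :: l1 :: l2 :: rest) 1 0 = l1 := by
    simp [PySem.List.pyGetD, PySem.List.pyGet?, PySem.List.pyIdx?]
    split <;> simp_all <;> omega
  have e2 : PySem.List.pyGetD (l0 :: l1 :: l2 :: rest) 2 0 = l2 := by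
    simp [PySem.List.pyGetD, PySem.List.pyGet?, PySem.List.pyIdx?]
    split <;> simp_all <;> omega
  rw [e0, e1, e2]
  dsimp only
  set L2 : Int := if l2 = 0 then 1 else l2 with hL2def
  rcases hdisj with ⟨h0, h1, h2, hlen⟩ | ⟨hl0, h1, h2⟩ | ⟨h0, hl1, h2⟩
    | ⟨hl0, hl1, hl2⟩ | ⟨h0, h1, hl2, hlen2, hmem⟩
  · -- the natural domain
    have hL2max : L2 = max 1 l2 := by rw [hL2def]; split <;> omega
    have hL2pos : 0 < L2 := by omega
    have hN0 : 0 ≤ l0 * l1 * L2 := by positivity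
    have hNlen : l0 * l1 * L2 ≤ (g.length : Int) := by rw [hL2max]; exact hlen
    have hkmin : (if L2 < 2 then (0:Int) else 0) = 0 := by split <;> rfl
    have hkmax : (if L2 < 2 then (1:Int) else L2) = L2 := by split <;> omega
    rw [hkmin, hkmax]
    rw [pv_copy g (l0 * l1 * L2) hN0 hNlen]
    by_cases hl0 : 0 < l0
    · by_cases hl1 : 0 < l1
      · obtain ⟨m, hm⟩ : ∃ m : Nat, L2 = (m : Int) := ⟨L2.toNat, by omega⟩
        rw [hm]
        rw [pv_nested3 l0 l1 hl0 hl1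
          (fun t k j i => pvA_cell g label l0 l1 ((m : Nat) : Int) t k j i) m]
        exact pv_main_pos g label l0 l1 ((m : Nat) : Int) hl0 hl1 (by omega)
          (by rw [← hm]; exact hNlen)
      · have h10 : l1 = 0 := by omega
        subst h10
        simp [PySem.List.pyRange_one_eq_nil]
    · have h00 : l0 = 0 := by omega
      subst h00
      simp [PySem.List.pyRange_one_eq_nil]
  · -- l0 < 0: the i-range is empty and the grid size is nonpositive; both return []
    have hL2pos : 0 < L2 := by rw [hL2def]; split <;> omega
    have hN : l0 * l1 * L2 ≤ 0 :=
      mul_nonpos_of_nonpos_of_nonneg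
        (mul_nonpos_of_nonpos_of_nonneg (le_of_lt hl0) h1) (le_of_lt hL2pos)
    simp [PySem.List.pyRange_one_eq_nil hN, PySem.List.pyRange_one_eq_nil (le_of_lt hl0),
      PySem.List.pyRepeat_singleton, Int.toNat_of_nonpos hN]
  · -- l1 < 0: the j-range is empty and the grid size is nonpositive; both return []
    have hL2pos : 0 < L2 := by rw [hL2def]; split <;> omega
    have hN : l0 * l1 * L2 ≤ 0 :=
      mul_nonpos_of_nonpos_of_nonneg
        (mul_nonpos_of_nonneg_of_nonpos h0 (le_of_lt hl1)) (le_of_lt hL2pos)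
    simp [PySem.List.pyRange_one_eq_nil hN, PySem.List.pyRange_one_eq_nil (le_of_lt hl1),
      PySem.List.pyRepeat_singleton, Int.toNat_of_nonpos hN]
  · -- all dimensions negative: the j-range is empty and the grid size is negative
    have hL2neg : L2 < 0 := by rw [hL2def]; split <;> omega
    have hN : l0 * l1 * L2 ≤ 0 :=
      mul_nonpos_of_nonneg_of_nonpos (le_of_lt (mul_pos_of_neg_of_neg hl0 hl1))
        (le_of_lt hL2neg)
    simp [PySem.List.pyRange_one_eq_nil hN, PySem.List.pyRange_one_eq_nil (le_of_lt hl1),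
      PySem.List.pyRepeat_singleton, Int.toNat_of_nonpos hN]
  · -- l2 < 0 with no seed in the scanned plane: A's scan never fires; both return []
    have hL2neg : L2 < 0 := by rw [hL2def]; split <;> omega
    have hN : l0 * l1 * L2 ≤ 0 :=
      mul_nonpos_of_nonneg_of_nonpos (mul_nonneg h0 h1) (le_of_lt hL2neg)
    have hkmax : (if L2 < 2 then (1:Int) else L2) = 1 := by split <;> omega
    have hkmin : (if L2 < 2 then (0:Int) else 0) = 0 := by split <;> rfl
    rw [hkmin, hkmax]
    have hnoseed : ∀ (t : List Int) (j i : Int),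
        0 ≤ j → j < l1 → 0 ≤ i → i < l0 →
        pvA_cell g label l0 l1 L2 t 0 j i = t := by
      intro t j i hj0 hj1 hi0 hi1
      unfold pvA_cell
      rw [show i + (j + 0 * l1) * l0 = i + j * l0 by ring]
      have hjl0 : 0 ≤ j * l0 := mul_nonneg hj0 h0
      have hidx0 : 0 ≤ i + j * l0 := by omega
      have hidxlt : i + j * l0 < l0 * l1 := by
        nlinarith [mul_le_mul_of_nonneg_right (by omega : j + 1 ≤ l1) h0]
      have hidxlen : i + j * l0 < (g.length : Int) := lt_of_lt_of_le hidxlt hlen2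
      have hval : PySem.List.pyGetD g (i + j * l0) 0
          = g[(i + j * l0).toNat]'(by omega) :=
        PySem.List.pyGetD_eq_getElem _ _ hidx0 hidxlen
      have hmemtake : g[(i + j * l0).toNat]'(by omega) ∈ g.take (l0 * l1).toNat := by
        have hlt : (i + j * l0).toNat < (g.take (l0 * l1).toNat).length := by
          simp [List.length_take]; omega
        rw [← List.getElem_take (xs := g) (j := (l0 * l1).toNat) (h := hlt)]
        exact List.getElem_mem hlt
      have hne : PySem.List.pyGetD g (i + j * l0) 0 ≠ label := by
        rw [hval]; intro hEq; exact hmem (hEq ▸ hmemtake)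
      simp [hne]
    have hplane : ∀ (t : List Int),
        (PySem.List.pyRange 0 l1 1).foldl (fun t j =>
          (PySem.List.pyRange 0 l0 1).foldl (fun t i =>
            pvA_cell g label l0 l1 L2 t 0 j i) t) t = t := by
      intro t
      have hrow : ∀ (acc : List Int) (j : Int), j ∈ PySem.List.pyRange 0 l1 1 →
          (PySem.List.pyRange 0 l0 1).foldl
            (fun t i => pvA_cell g label l0 l1 L2 t 0 j i) acc = acc := by
        intro acc j hj
        obtain ⟨hj0, hj1⟩ := PySem.List.mem_pyRange_one.mp hj
        have hrow' : (PySem.List.pyRange 0 l0 1).foldl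
            (fun t i => pvA_cell g label l0 l1 L2 t 0 j i) acc
            = (PySem.List.pyRange 0 l0 1).foldl (fun t _ => t) acc := by
          apply PySem.List.foldl_congr_mem
          intro acc2 i hi
          obtain ⟨hi0, hi1⟩ := PySem.List.mem_pyRange_one.mp hi
          exact hnoseed acc2 j i hj0 hj1 hi0 hi1
        rw [hrow']
        exact PySem.List.foldl_ignore _ _
      have hall : (PySem.List.pyRange 0 l1 1).foldl (fun t j =>
          (PySem.List.pyRange 0 l0 1).foldl (fun t i =>
            pvA_cell g label l0 l1 L2 t 0 j i) t) t
          = (PySem.List.pyRange 0 l1 1).foldl (fun t _ => t) t := by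
        apply PySem.List.foldl_congr_mem
        intro acc j hj
        exact hrow acc j hj
      rw [hall]
      exact PySem.List.foldl_ignore _ _
    rw [PySem.List.pyRange_one_cons (by omega : (0:Int) < 1),
      PySem.List.pyRange_one_eq_nil (by omega : (1:Int) ≤ 0 + 1)]
    simp only [List.foldl_cons, List.foldl_nil]
    rw [hplane]
    simp [PySem.List.pyRange_one_eq_nil hN, PySem.List.pyRepeat_singleton,
      Int.toNat_of_nonpos hN]

-- ===== VERDICT (by name: the statement is the Claim_ definition above) =====
theorem expandLabel_spec : Claim_equal_expandLabel := by
  intro grainMap label L _hdom hpre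
  unfold Spec_expandLabel
  unfold Pre_expandLabel at hpre
  match L, hpre with
  | l0 :: l1 :: l2 :: rest, ⟨_, hdisj⟩ =>
    simp only [List.getD_cons_zero, List.getD_cons_succ] at hdisj
    exact pv_main grainMap label l0 l1 l2 rest hdisj
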